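-- pv_equiv track=rewrite | github.com/evelynrodriguezc/fundamentosdeprogramacion | funciones2/filtrar_datos.py | procesar_nums
-- ===== SOURCE A (Python) =====
-- def procesar_nums(numeros:list):
--     def es_positivo(n):
--         return n > 0
--
--     def es_negativo(n):
--         return n < 0
--
--     def es_par(n):
--         return n % 2 == 0
--
--     def filtro(lista):
--         total_positivos  = 0
--         total_negativos = 0
--         total_pares = 0
--
--         for numero in lista:
--             if es_positivo(numero):
--                 total_positivos += numero
--             if es_negativo(numero):
--                 total_negativos += numero
--             if es_par(numero):
--                 total_pares += numero
--         return[total_positivos, total_negativos, total_pares]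
--     return filtro(numeros)
-- ===== SOURCE B (Python) =====
-- def procesar_nums(numeros: list):
--     total_positivos = sum(n for n in numeros if n > 0)
--     total_negativos = sum(n for n in numeros if n < 0)
--     total_pares = sum(n for n in numeros if n % 2 == 0)
--     return [total_positivos, total_negativos, total_pares]
-- ===== Notes on version B (the rewrite author's own statement) =====
-- stated objective: simpler
-- what changed: Replaces the fused single loop with three accumulators (plus three helper predicates and a nested filtro helper) by three independent filtered sums, one per total.
import Mathlib
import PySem

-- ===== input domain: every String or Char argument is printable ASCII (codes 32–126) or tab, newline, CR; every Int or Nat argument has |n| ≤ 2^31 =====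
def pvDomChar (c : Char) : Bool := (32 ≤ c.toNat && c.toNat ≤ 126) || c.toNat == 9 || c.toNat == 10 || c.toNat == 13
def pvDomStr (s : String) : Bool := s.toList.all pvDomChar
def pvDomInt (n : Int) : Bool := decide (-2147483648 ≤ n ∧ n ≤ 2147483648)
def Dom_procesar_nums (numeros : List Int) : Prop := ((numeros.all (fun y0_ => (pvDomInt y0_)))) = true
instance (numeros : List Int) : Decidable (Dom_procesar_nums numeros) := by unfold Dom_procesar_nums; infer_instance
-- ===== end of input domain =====

-- B replaces A's fused single loop with three independent filtered sums (simpler decomposition).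


-- ===== PORT A =====
def pvA_es_positivo (n : Int) : Bool := n > 0
def pvA_es_negativo (n : Int) : Bool := n < 0
def pvA_es_par (n : Int) : Bool := PySem.Int.mod n 2 == 0
-- the fused loop of A's nested helper `filtro`, state = (total_positivos, total_negativos, total_pares)
def pvA_filtro (lista : List Int) : List Int :=
  let st := lista.foldl (fun (s : Int × Int × Int) numero =>
    let s := if pvA_es_positivo numero then (s.1 + numero, s.2.1, s.2.2) else s
    let s := if pvA_es_negativo numero then (s.1, s.2.1 + numero, s.2.2) else s
    if pvA_es_par numero then (s.1, s.2.1, s.2.2 + numero) else s) (0, 0, 0)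
  [st.1, st.2.1, st.2.2]
def procesar_nums (numeros : List Int) : List Int := pvA_filtro numeros

-- ===== PORT B =====
def procesar_nums_alt (numeros : List Int) : List Int :=
  let total_positivos := ((numeros.filter (fun n => n > 0)).map id).sum
  let total_negativos := ((numeros.filter (fun n => n < 0)).map id).sum
  let total_pares := ((numeros.filter (fun n => PySem.Int.mod n 2 == 0)).map id).sum
  [total_positivos, total_negativos, total_pares]

-- ===== PRECONDITION & SPEC =====
def Spec_procesar_nums (numeros : List Int) (out : List Int) : Prop := out = procesar_nums_alt numeros
instance (numeros : List Int) (out : List Int) : Decidable (Spec_procesar_nums numeros out) := by unfold Spec_procesar_nums; infer_instance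

-- ===== CLAIM (what is proved, stated in full; the proofs are below) =====
def Claim_equal_procesar_nums : Prop := ∀ (numeros : List Int), Dom_procesar_nums numeros → Spec_procesar_nums numeros (procesar_nums numeros)

-- ===== LEMMAS AND PROOFS =====
-- loop invariant: the fused fold from an arbitrary start equals start + the three filtered sums
theorem pvA_fold_eq (lista : List Int) (a b c : Int) :
    lista.foldl (fun (s : Int × Int × Int) numero =>
      let s := if pvA_es_positivo numero then (s.1 + numero, s.2.1, s.2.2) else s
      let s := if pvA_es_negativo numero then (s.1, s.2.1 + numero, s.2.2) else s
      if pvA_es_par numero then (s.1, s.2.1, s.2.2 + numero) else s) (a, b, c)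
    = (a + ((lista.filter (fun n => n > 0)).map id).sum,
       b + ((lista.filter (fun n => n < 0)).map id).sum,
       c + ((lista.filter (fun n => PySem.Int.mod n 2 == 0)).map id).sum) := by
  induction lista generalizing a b c with
  | nil => simp
  | cons x xs ih =>
    simp only [List.foldl_cons, List.filter_cons]
    by_cases h1 : pvA_es_positivo x <;> by_cases h2 : pvA_es_negativo x <;>
        by_cases h3 : pvA_es_par x <;>
      simp only [h1, h2, h3, if_true, if_false, Bool.false_eq_true] <;>
      simp only [ih] <;>
      simp only [pvA_es_positivo, pvA_es_negativo, pvA_es_par, decide_eq_true_eq,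
        beq_iff_eq, PySem.Int.mod_eq_zero_iff_dvd] at h1 h2 h3 <;>
      simp [h1, h2, h3, Prod.ext_iff] <;> omega

-- ===== VERDICT (by name: the statement is the Claim_ definition above) =====
theorem procesar_nums_spec : Claim_equal_procesar_nums := by
  intro numeros _
  unfold Spec_procesar_nums procesar_nums pvA_filtro procesar_nums_alt
  simp [pvA_fold_eq]
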